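-- pv_equiv track=rewrite | github.com/LeeWeiChen2200810/INF1008-ScamNumberChecker | yi_tong_text_checker.py | arr_word_by_word
-- ===== SOURCE A (Python) =====
-- def arr_word_by_word(word):
--     wording_array = word.split()
--
--     output_array = []
--
--     for word in wording_array:
--         temp_word = ''
--         for char in word:
--             if char.isalpha() or char.isdigit():
--                 temp_word += char.lower()
--             else:
--                 if temp_word:
--                     output_array.append(temp_word)
--                 temp_word = ''
--                 output_array.append(char)
--         if temp_word:
--             output_array.append(temp_word)
--     return output_array
-- ===== SOURCE B (Python) =====
-- def arr_word_by_word(word):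
--     # Two-pointer run scanner: slice out each maximal alphanumeric run at once
--     # instead of accumulating a temp string char by char.
--     out = []
--     for w in word.split():
--         i, n = 0, len(w)
--         while i < n:
--             if w[i].isalpha() or w[i].isdigit():
--                 j = i
--                 while j < n and (w[j].isalpha() or w[j].isdigit()):
--                     j += 1
--                 out.append(w[i:j].lower())
--                 i = j
--             else:
--                 out.append(w[i])
--                 i += 1
--     return out
-- ===== Notes on version B (the rewrite author's own statement) =====
-- stated objective: alternative
-- what changed: Replaced A's char-by-char temp-string accumulator with flush logic by a two-pointer run scanner that finds each maximal alphanumeric run and appends the lowercased slice in one step.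
import Mathlib
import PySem

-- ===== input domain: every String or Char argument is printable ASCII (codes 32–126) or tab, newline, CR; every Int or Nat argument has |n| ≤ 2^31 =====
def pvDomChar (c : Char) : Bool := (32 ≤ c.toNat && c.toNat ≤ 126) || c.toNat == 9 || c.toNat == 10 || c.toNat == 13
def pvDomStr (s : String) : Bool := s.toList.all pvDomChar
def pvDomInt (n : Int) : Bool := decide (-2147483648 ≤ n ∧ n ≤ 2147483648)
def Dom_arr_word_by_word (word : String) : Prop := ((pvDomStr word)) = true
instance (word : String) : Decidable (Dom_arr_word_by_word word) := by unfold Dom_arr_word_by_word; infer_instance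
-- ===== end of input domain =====

-- B replaces A's char-by-char temp-string accumulator with a run scanner that emits each
-- maximal alphanumeric run (lowercased) in one step; same cost, different decomposition.


-- ===== PORT A =====
-- 'char.isalpha() or char.isdigit()'
def pvAlnum (c : Char) : Bool := PySem.Chars.isalpha c || PySem.Chars.isdigit c

-- inner loop body: state = (output_array, temp_word as List Char)
def pvStepA (st : List String × List Char) (c : Char) : List String × List Char :=
  if pvAlnum c then
    (st.1, st.2 ++ [PySem.Chars.lowerChar c])
  else
    ((if st.2 ≠ [] then st.1 ++ [String.ofList st.2] else st.1) ++ [String.ofList [c]], [])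

def arr_word_by_word (word : String) : List String :=
  let wording_array := PySem.Str.split₀ word
  wording_array.foldl (fun output_array w =>
    let st := w.toList.foldl pvStepA (output_array, [])
    if st.2 ≠ [] then st.1 ++ [String.ofList st.2] else st.1) []

-- ===== PORT B =====
-- the inner while loop: advance past a maximal alphanumeric run (the slice w[i:j],
-- lowercased) or emit the single non-alphanumeric char; i → head, j found by takeWhile
def pvRunTok : List Char → List String
  | [] => []
  | c :: cs =>
    if pvAlnum c then
      String.ofList (PySem.Chars.lower (c :: cs.takeWhile pvAlnum)) :: pvRunTok (cs.dropWhile pvAlnum)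
    else
      String.ofList [c] :: pvRunTok cs
termination_by cs => cs.length
decreasing_by
  · exact Nat.lt_succ_of_le (List.length_dropWhile_le _ _)
  · exact Nat.lt_succ_self _

def arr_word_by_word_alt (word : String) : List String :=
  (PySem.Str.split₀ word).flatMap (fun w => pvRunTok w.toList)

-- ===== PRECONDITION & SPEC =====
def Spec_arr_word_by_word (word : String) (out : List String) : Prop := out = arr_word_by_word_alt word
instance (word : String) (out : List String) : Decidable (Spec_arr_word_by_word word out) := by unfold Spec_arr_word_by_word; infer_instance

-- ===== CLAIM (what is proved, stated in full; the proofs are below) =====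
def Claim_equal_arr_word_by_word : Prop := ∀ (word : String), Dom_arr_word_by_word word → Spec_arr_word_by_word word (arr_word_by_word word)

-- ===== LEMMAS AND PROOFS =====

-- proof-side bridge: tokenize cs with a pending (already lowercased) run temp
def pvTokFrom (temp : List Char) : List Char → List String
  | [] => if temp ≠ [] then [String.ofList temp] else []
  | c :: cs =>
    if pvAlnum c then pvTokFrom (temp ++ [PySem.Chars.lowerChar c]) cs
    else (if temp ≠ [] then [String.ofList temp] else []) ++ String.ofList [c] :: pvTokFrom [] cs

theorem pvA_inner (cs : List Char) : ∀ (out : List String) (temp : List Char),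
    (let st := cs.foldl pvStepA (out, temp);
     if st.2 ≠ [] then st.1 ++ [String.ofList st.2] else st.1) = out ++ pvTokFrom temp cs := by
  induction cs with
  | nil =>
    intro out temp
    simp only [List.foldl_nil, pvTokFrom]
    split
    · rfl
    · simp
  | cons c cs ih =>
    intro out temp
    simp only [List.foldl_cons, pvStepA, pvTokFrom]
    by_cases h : pvAlnum c
    · simp only [h, if_pos]
      exact ih out (temp ++ [PySem.Chars.lowerChar c])
    · simp only [h, if_false, Bool.false_eq_true]
      rw [ih]
      split <;> simp

theorem pvTokFrom_run (cs : List Char) : ∀ (temp : List Char), temp ≠ [] →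
    pvTokFrom temp cs =
      String.ofList (temp ++ (cs.takeWhile pvAlnum).map PySem.Chars.lowerChar) :: pvTokFrom [] (cs.dropWhile pvAlnum) := by
  induction cs with
  | nil => intro temp h; simp [pvTokFrom, h]
  | cons c cs ih =>
    intro temp h
    by_cases hc : pvAlnum c
    · simp only [pvTokFrom, hc, if_true, List.takeWhile_cons_of_pos, List.dropWhile_cons_of_pos,
        List.map_cons]
      rw [ih _ (by simp)]
      simp
    · simp [pvTokFrom, hc, h, List.takeWhile_cons_of_neg, List.dropWhile_cons_of_neg]

theorem pvRunTok_eq (cs : List Char) : pvRunTok cs = pvTokFrom [] cs := by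
  induction cs using pvRunTok.induct with
  | case1 => simp [pvRunTok, pvTokFrom]
  | case2 c cs hc ih =>
    rw [pvRunTok, if_pos hc, pvTokFrom, if_pos hc, List.nil_append,
      pvTokFrom_run _ _ (by simp), ih]
    rfl
  | case3 c cs hc ih =>
    rw [pvRunTok, if_neg hc, pvTokFrom, if_neg hc, ih]
    simp

-- ===== VERDICT (by name: the statement is the Claim_ definition above) =====
theorem arr_word_by_word_spec : Claim_equal_arr_word_by_word := by
  intro word _
  show arr_word_by_word word = arr_word_by_word_alt word
  unfold arr_word_by_word arr_word_by_word_alt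
  have hbody : ∀ (out : List String) (w : String),
      (let st := w.toList.foldl pvStepA (out, []);
       if st.2 ≠ [] then st.1 ++ [String.ofList st.2] else st.1) = out ++ pvRunTok w.toList := by
    intro out w
    rw [pvA_inner, pvRunTok_eq]
  simp only [hbody]
  exact PySem.List.foldl_append_eq_flatMap _ _ []
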